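-- pv_equiv track=rewrite | github.com/rexfa/WebCrawlerR | contentPageReader.py | getinnerhtml
-- ===== SOURCE A (Python) =====
-- def getinnerhtml(data):
--     i=0
--     leftT = []
--     rightT= []
--     while True:
--         try:
--             i = data.index('<',i+1)
--             leftT.append(i)
--         except:
--             break
--     i=0
--     while True:
--         try:
--             i = data.index('>',i+1)
--             rightT.append(i)
--         except:
--             break
--     return leftT,rightT
-- ===== SOURCE B (Python) =====
-- def getinnerhtml(data):
--     leftT = []
--     rightT = []
--     for i, ch in enumerate(data[1:], 1):
--         if ch == '<':
--             leftT.append(i)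
--         elif ch == '>':
--             rightT.append(i)
--     return leftT, rightT
-- ===== Notes on version B (the rewrite author's own statement) =====
-- stated objective: simpler
-- what changed: Replaces A's two while/try loops of repeated str.index calls (one full scan per bracket kind, with try/except as the loop exit) by a single enumerate pass over data[1:] that appends to both position lists at once; the start at index 1 reproduces A's behaviour of never reporting position 0.
import Mathlib
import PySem

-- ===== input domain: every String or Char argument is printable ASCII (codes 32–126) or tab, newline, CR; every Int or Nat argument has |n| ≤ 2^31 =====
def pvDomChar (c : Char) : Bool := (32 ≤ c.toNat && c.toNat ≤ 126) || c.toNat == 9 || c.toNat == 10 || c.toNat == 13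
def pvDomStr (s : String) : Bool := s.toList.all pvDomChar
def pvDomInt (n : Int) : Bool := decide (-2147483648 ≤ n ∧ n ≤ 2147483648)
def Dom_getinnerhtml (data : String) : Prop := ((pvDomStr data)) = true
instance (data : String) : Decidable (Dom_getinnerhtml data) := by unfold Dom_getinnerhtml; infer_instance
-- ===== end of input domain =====

-- B replaces A's two while/try loops of repeated str.index calls by a single
-- enumerate pass over data[1:] that fills both position lists at once (simpler);
-- like A, it never reports position 0 (A's searches start at index 1).


-- ===== PORT A =====
-- data.index(c, i+1): first index ≥ i+1 holding c (none = ValueError, which A's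
-- bare except turns into loop exit); exact on the admitted ASCII domain.
def pvIndexFrom (cs : List Char) (c : Char) (start : Nat) : Option Nat :=
  (PySem.List.index? (cs.drop start) c).map (· + start)

theorem pvIndexFrom_some_bounds {cs : List Char} {c : Char} {start j : Nat}
    (h : pvIndexFrom cs c start = some j) : start ≤ j ∧ j < cs.length := by
  unfold pvIndexFrom at h
  obtain ⟨k, hk, hkj⟩ := Option.map_eq_some_iff.mp h
  obtain ⟨hk', hcv, _⟩ := PySem.List.getElem_of_index?_eq_some hk
  rw [List.length_drop] at hk'
  omega

-- one Python while-loop: i = data.index(c, i+1); acc.append(i); break on ValueError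
def pvLoopA (cs : List Char) (c : Char) (i : Nat) (acc : List Int) : List Int :=
  match h : pvIndexFrom cs c (i + 1) with
  | none => acc
  | some j => pvLoopA cs c j (acc ++ [(j : Int)])
termination_by cs.length - i
decreasing_by
  have := pvIndexFrom_some_bounds h
  omega

def getinnerhtml (data : String) : List Int × List Int :=
  (pvLoopA data.toList '<' 0 [], pvLoopA data.toList '>' 0 [])

-- ===== PORT B =====
-- for i, ch in enumerate(data[1:], 1): append i to leftT on '<', to rightT on '>'
def getinnerhtml_alt (data : String) : List Int × List Int :=
  (PySem.List.enumerate (PySem.List.slice data.toList (some 1) none) 1).foldl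
    (fun acc p =>
      if p.2 = '<' then (acc.1 ++ [p.1], acc.2)
      else if p.2 = '>' then (acc.1, acc.2 ++ [p.1])
      else acc)
    ([], [])

-- ===== PRECONDITION & SPEC =====
def Spec_getinnerhtml (data : String) (out : List Int × List Int) : Prop :=
  out = getinnerhtml_alt data
instance (data : String) (out : List Int × List Int) : Decidable (Spec_getinnerhtml data out) := by
  unfold Spec_getinnerhtml; infer_instance

-- ===== CLAIM (what is proved, stated in full; the proofs are below) =====
def Claim_equal_getinnerhtml : Prop :=
  ∀ (data : String), Dom_getinnerhtml data → Spec_getinnerhtml data (getinnerhtml data)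

-- ===== LEMMAS AND PROOFS =====

-- positions (labelled from k) of character c in a list
def pvPos (l : List Char) (c : Char) (k : Nat) : List Int :=
  match l with
  | [] => []
  | x :: xs => if x = c then (k : Int) :: pvPos xs c (k + 1) else pvPos xs c (k + 1)

theorem pvPos_not_mem {l : List Char} {c : Char} (h : c ∉ l) (k : Nat) :
    pvPos l c k = [] := by
  induction l generalizing k with
  | nil => rfl
  | cons x xs ih =>
      simp only [List.mem_cons, not_or] at h
      simp [pvPos, Ne.symm h.1, ih h.2]

theorem pvPos_split {pre : List Char} {c : Char} (h : c ∉ pre) (suf : List Char) (k : Nat) :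
    pvPos (pre ++ c :: suf) c k = ((k + pre.length : Nat) : Int) :: pvPos suf c (k + pre.length + 1) := by
  induction pre generalizing k with
  | nil => simp [pvPos]
  | cons x xs ih =>
      simp only [List.mem_cons, not_or] at h
      simp only [List.cons_append, pvPos, if_neg (Ne.symm h.1), ih h.2]
      have h1 : k + 1 + xs.length = k + (x :: xs).length := by
        simp only [List.length_cons]; omega
      rw [h1]

-- A's loop collects exactly the positions ≥ i+1 holding c
theorem pvLoopA_eq (cs : List Char) (c : Char) :
    ∀ i acc, pvLoopA cs c i acc = acc ++ pvPos (cs.drop (i + 1)) c (i + 1) := by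
  intro i acc
  induction hn : cs.length - i using Nat.strong_induction_on generalizing i acc with
  | _ n ih =>
      rw [pvLoopA]
      split
      next h =>
          unfold pvIndexFrom at h
          simp only [Option.map_eq_none_iff, PySem.List.index?_eq_none_iff] at h
          simp [pvPos_not_mem h]
      next j h =>
          obtain ⟨hij, hjlen⟩ := pvIndexFrom_some_bounds h
          unfold pvIndexFrom at h
          obtain ⟨k, hk, hkj⟩ := Option.map_eq_some_iff.mp h
          obtain ⟨pre, suf, hdec, hlen, hnm⟩ := (PySem.List.index?_eq_some_iff _ _ _).mp hk
          have hsuf : suf = cs.drop (j + 1) := by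
            have : (cs.drop (i+1)).drop (k+1) = cs.drop (j+1) := by
              rw [List.drop_drop]; congr 1; omega
            rw [← this, hdec, ← hlen,
              show pre.length + 1 = (pre ++ [c]).length by simp,
              show pre ++ c :: suf = (pre ++ [c]) ++ suf by simp,
              List.drop_left]
          rw [ih (cs.length - j) (by omega) j _ rfl, hdec, pvPos_split hnm]
          have h1 : (i + 1) + pre.length = j := by omega
          rw [hsuf, h1]
          simp

theorem getinnerhtml_eq (data : String) :
    getinnerhtml data =
      (pvPos (data.toList.drop 1) '<' 1, pvPos (data.toList.drop 1) '>' 1) := by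
  simp [getinnerhtml, pvLoopA_eq]

-- B's single fold fills both lists with the labelled positions
theorem pvFold_enumerate_eq (l : List Char) :
    ∀ (k : Nat) (L R : List Int),
      (PySem.List.enumerate l (k : Int)).foldl
        (fun acc p =>
          if p.2 = '<' then (acc.1 ++ [p.1], acc.2)
          else if p.2 = '>' then (acc.1, acc.2 ++ [p.1])
          else acc) (L, R)
      = (L ++ pvPos l '<' k, R ++ pvPos l '>' k) := by
  induction l with
  | nil => intro k L R; simp [PySem.List.enumerate_nil, pvPos]
  | cons x xs ih =>
      intro k L R
      have hk : (k : Int) + 1 = ((k + 1 : Nat) : Int) := by push_cast; ring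
      rw [PySem.List.enumerate_cons, List.foldl_cons, hk]
      by_cases h1 : x = '<'
      · rw [if_pos h1, ih]
        simp [pvPos, h1]
      · by_cases h2 : x = '>'
        · rw [if_neg h1, if_pos h2, ih]
          simp [pvPos, h2]
        · rw [if_neg h1, if_neg h2, ih]
          simp [pvPos, h1, h2]

theorem getinnerhtml_alt_eq (data : String) :
    getinnerhtml_alt data =
      (pvPos (data.toList.drop 1) '<' 1, pvPos (data.toList.drop 1) '>' 1) := by
  unfold getinnerhtml_alt
  rw [PySem.List.slice_from_one,
    show (1 : Int) = ((1 : Nat) : Int) by norm_num,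
    pvFold_enumerate_eq]
  simp [← List.drop_one]

-- ===== VERDICT (by name: the statement is the Claim_ definition above) =====
theorem getinnerhtml_spec : Claim_equal_getinnerhtml := by
  intro data _
  unfold Spec_getinnerhtml
  rw [getinnerhtml_eq, getinnerhtml_alt_eq]
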